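-- pv_equiv track=rewrite | github.com/EmberCodeEx/AutoGrader | a04.py | mostTouchableLocker
-- ===== SOURCE A (Python) =====
-- def mostTouchableLocker(number_of_lockers, number_of_students):
--     if number_of_students < 0 or number_of_lockers < 0:
--         return None
--     most_touched_locker = -1
--     most_touches = 0
--     lockersData = initialLogic(number_of_lockers, number_of_students)
--     for i in range(0, len(lockersData)):
--         locker = lockersData[i]
--         if locker[1] >= most_touches:
--             most_touches = locker[1]
--             most_touched_locker = i
--     return most_touched_locker + 1
--
-- def initialLogic(no_of_lockers, no_of_students):
--     # lockersData = [[0, 1], [0, 1] .... ]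
--     lockersData = []
--     for i in range(1, no_of_students + 1):
--         if i == 1:
--             for j in range(1, no_of_lockers + 1):
--                 # first element of locker is locker state == open/close
--                 # second element of locker is no of touches
--                 # 0 == locker close, 1 == locker open
--                 locker = [1, 1]
--                 lockersData.append(locker)
--         else:
--             for k in range(2, no_of_lockers + 1):
--                 # get locker data at index k - 1
--                 locker = lockersData[k - 1]
--                 # check if index of locker id properly divisible by index of student
--                 if k % i == 0:
--                     # check if locker is closed then open it else close it
--                     if locker[0] == 0:
--                         locker[0] = 1
--                     else:
--                         locker[0] = 0
--                     # increase nuumber of touchers by one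
--                     locker[1] = locker[1] + 1
--                     # update locker data
--                     lockersData[k - 1] = locker
--     return lockersData
-- ===== SOURCE B (Python) =====
-- def mostTouchableLocker(number_of_lockers, number_of_students):
--     if number_of_students < 0 or number_of_lockers < 0:
--         return None
--     if number_of_lockers == 0 or number_of_students == 0:
--         return 0
--     # Sieve: locker k is touched once by student 1 and once by each
--     # student d with 2 <= d <= number_of_students that divides k.
--     counts = [1] * number_of_lockers
--     for d in range(2, min(number_of_students, number_of_lockers) + 1):
--         for m in range(d, number_of_lockers + 1, d):
--             counts[m - 1] += 1
--     # last index with the maximal count (ties go to the later locker)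
--     best_idx, best = -1, 0
--     for idx, c in enumerate(counts):
--         if c >= best:
--             best_idx, best = idx, c
--     return best_idx + 1
-- ===== Notes on version B (the rewrite author's own statement) =====
-- stated objective: faster
-- what changed: Replaces the per-student simulation of every locker (with open/close state) by a divisor sieve that adds 1 to counts[m-1] for every multiple m of each student d <= min(students, lockers), then takes the last argmax of the counts.
import Mathlib
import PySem

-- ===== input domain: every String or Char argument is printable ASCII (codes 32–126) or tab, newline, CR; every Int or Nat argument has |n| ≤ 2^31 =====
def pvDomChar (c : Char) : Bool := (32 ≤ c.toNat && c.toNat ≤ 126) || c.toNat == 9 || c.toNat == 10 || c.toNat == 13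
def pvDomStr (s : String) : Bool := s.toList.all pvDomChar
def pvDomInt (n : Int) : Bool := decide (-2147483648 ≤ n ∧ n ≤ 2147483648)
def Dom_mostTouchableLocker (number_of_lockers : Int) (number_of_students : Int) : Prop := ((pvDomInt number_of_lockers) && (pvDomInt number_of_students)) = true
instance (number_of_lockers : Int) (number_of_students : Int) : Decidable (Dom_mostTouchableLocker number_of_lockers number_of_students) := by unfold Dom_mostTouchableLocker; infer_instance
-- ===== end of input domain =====

-- B replaces A's per-student locker simulation by a divisor sieve over multiples
-- plus a last-argmax scan of the touch counts (measured faster, asymptotic change).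


-- ===== PORT A =====
-- one iteration of A's inner 'for k' loop for student i (lockers are (state, touches) pairs)
def pvStepA (i : Int) (d : List (Int × Int)) (k : Int) : List (Int × Int) :=
  match PySem.List.pyGet? d (k - 1) with
  | none => d          -- Python would raise IndexError here; unreachable on A's runs
  | some locker =>
      if PySem.Int.mod k i == 0 then
        let locker1 : Int × Int := if locker.1 == 0 then (1, locker.2) else (0, locker.2)
        let locker2 : Int × Int := (locker1.1, locker1.2 + 1)
        d.set (k - 1).toNat locker2        -- lockersData[k - 1] = locker  (k - 1 ≥ 1 here)
      else d

def initialLogic (no_of_lockers : Int) (no_of_students : Int) : List (Int × Int) :=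
  (PySem.List.pyRange 1 (no_of_students + 1)).foldl (fun lockersData i =>
    if i == 1 then
      (PySem.List.pyRange 1 (no_of_lockers + 1)).foldl (fun d _j => d ++ [(1, 1)]) lockersData
    else
      (PySem.List.pyRange 2 (no_of_lockers + 1)).foldl (pvStepA i) lockersData) []

def mostTouchableLocker (number_of_lockers : Int) (number_of_students : Int) : Option Int :=
  if number_of_students < 0 || number_of_lockers < 0 then none
  else
    let lockersData := initialLogic number_of_lockers number_of_students
    let r := (PySem.List.pyRange 0 (lockersData.length : Int)).foldl
      (fun (st : Int × Int) i =>
        match PySem.List.pyGet? lockersData i with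
        | none => st       -- unreachable: i ranges over valid indices
        | some locker => if locker.2 ≥ st.2 then (i, locker.2) else st)
      (-1, 0)
    some (r.1 + 1)

-- ===== PORT B =====
-- counts[k-1] = number of touches of locker k, built by a divisor sieve
def pvSieve (number_of_lockers : Int) (number_of_students : Int) : List Int :=
  (PySem.List.pyRange 2 (min number_of_students number_of_lockers + 1)).foldl (fun counts d =>
    (PySem.List.pyRange d (number_of_lockers + 1) d).foldl (fun counts m =>
      counts.modify (m - 1).toNat (· + 1)) counts)
    (List.replicate number_of_lockers.toNat 1)

def mostTouchableLocker_alt (number_of_lockers : Int) (number_of_students : Int) : Option Int :=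
  if number_of_students < 0 || number_of_lockers < 0 then none
  else if number_of_lockers == 0 || number_of_students == 0 then some 0
  else
    let counts := pvSieve number_of_lockers number_of_students
    let r := (PySem.List.enumerate counts).foldl
      (fun (st : Int × Int) p => if p.2 ≥ st.2 then (p.1, p.2) else st) (-1, 0)
    some (r.1 + 1)

-- ===== PRECONDITION & SPEC =====
def Spec_mostTouchableLocker (number_of_lockers : Int) (number_of_students : Int) (out : Option Int) : Prop := out = mostTouchableLocker_alt number_of_lockers number_of_students
instance (number_of_lockers : Int) (number_of_students : Int) (out : Option Int) : Decidable (Spec_mostTouchableLocker number_of_lockers number_of_students out) := by unfold Spec_mostTouchableLocker; infer_instance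

-- ===== CLAIM (what is proved, stated in full; the proofs are below) =====
def Claim_equal_mostTouchableLocker : Prop := ∀ (number_of_lockers : Int) (number_of_students : Int), Dom_mostTouchableLocker number_of_lockers number_of_students → Spec_mostTouchableLocker number_of_lockers number_of_students (mostTouchableLocker number_of_lockers number_of_students)

-- ===== LEMMAS AND PROOFS =====
-- proof-only helpers: a canonical "increment slot k-1 when c k" pass over the touch counts
def pvBump (c : Int → Bool) (xs : List Int) (k : Int) : List Int :=
  if c k then xs.modify (k - 1).toNat (· + 1) else xs

theorem pvBump_length (c : Int → Bool) (xs : List Int) (k : Int) :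
    (pvBump c xs k).length = xs.length := by
  unfold pvBump; split <;> simp

theorem pvBumpFold_length (c : Int → Bool) (ks : List Int) : ∀ xs : List Int,
    (ks.foldl (pvBump c) xs).length = xs.length := by
  induction ks with
  | nil => intro xs; rfl
  | cons k ks ih => intro xs; rw [List.foldl_cons, ih, pvBump_length]

theorem countP_sel_eq (l : List Int) (hl : l.Nodup) (c : Int → Bool) (v : Int) :
    l.countP (fun k => c k && (k == v)) = if v ∈ l ∧ c v = true then 1 else 0 := by
  induction l with
  | nil => simp
  | cons a l ih =>
    rcases List.nodup_cons.mp hl with ⟨ha, hl'⟩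
    rw [List.countP_cons]
    by_cases hav : a = v
    · subst hav
      have h0 : l.countP (fun k => c k && (k == a)) = 0 := by
        apply List.countP_eq_zero.mpr
        intro k hk
        have hne : k ≠ a := fun h => ha (h ▸ hk)
        simp [hne]
      rw [h0]
      by_cases hc : c a = true <;> simp [hc]
    · have hmem : (v ∈ a :: l ∧ c v = true) ↔ (v ∈ l ∧ c v = true) := by
        constructor
        · rintro ⟨hm, hc⟩
          rcases List.mem_cons.mp hm with h | h
          · exact absurd h.symm hav
          · exact ⟨h, hc⟩
        · rintro ⟨hm, hc⟩; exact ⟨List.mem_cons_of_mem _ hm, hc⟩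
      have hbeq : (a == v) = false := by simp [hav]
      simp only [hbeq, Bool.and_false, ih hl', hmem]
      simp

theorem pvBumpFold_getD (c : Int → Bool) (ks : List Int) (h1 : ∀ k ∈ ks, 1 ≤ k) :
    ∀ (xs : List Int) (j : Nat), j < xs.length →
    (ks.foldl (pvBump c) xs).getD j 0
      = xs.getD j 0 + (ks.countP (fun k => c k && (k == (j : Int) + 1)) : Int) := by
  induction ks with
  | nil => intro xs j hj; simp
  | cons k ks ih =>
    intro xs j hj
    have hk1 : (1 : Int) ≤ k := h1 k (List.mem_cons_self ..)
    have h1' : ∀ k ∈ ks, (1 : Int) ≤ k := fun k hk => h1 k (List.mem_cons_of_mem _ hk)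
    rw [List.foldl_cons, ih h1' _ j (by rw [pvBump_length]; exact hj)]
    have hstep : (pvBump c xs k).getD j 0
        = xs.getD j 0 + (if c k && (k == (j : Int) + 1) then 1 else 0) := by
      unfold pvBump
      by_cases hc : c k = true
      · rw [if_pos hc]
        by_cases hkj : k = (j : Int) + 1
        · subst hkj
          have hidx : ((j : Int) + 1 - 1).toNat = j := by omega
          rw [List.getD_eq_getElem _ _ (by simpa using hj),
              List.getD_eq_getElem _ _ hj]
          rw [List.getElem_modify, if_pos hidx]
          simp [hc]
        · have hidx : (k - 1).toNat ≠ j := by omega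
          have hbeq : (k == (j : Int) + 1) = false := by simp [hkj]
          rw [List.getD_eq_getElem _ _ (by simpa using hj),
              List.getD_eq_getElem _ _ hj]
          rw [List.getElem_modify, if_neg hidx]
          simp [hbeq]
      · have hb : (c k && (k == (j : Int) + 1)) = false := by
          simp; intro h; exact absurd h hc
        simp [hc]
    rw [hstep, List.countP_cons]
    push_cast
    by_cases hp : (c k && (k == (j : Int) + 1)) = true <;> simp [hp]
    ring

-- the A-side inner pass, projected to touch counts, is a pvBump pass
theorem pvStepA_snd (i k : Int) (d : List (Int × Int)) (h2 : 2 ≤ k)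
    (hk : (k - 1).toNat < d.length) :
    (pvStepA i d k).map (·.2)
      = pvBump (fun k => PySem.Int.mod k i == 0) (d.map (·.2)) k
    ∧ (pvStepA i d k).length = d.length := by
  have h0 : (0 : Int) ≤ k - 1 := by omega
  have hlt : k - 1 < (d.length : Int) := by omega
  unfold pvStepA pvBump
  rw [PySem.List.pyGet?_eq_some_getElem d h0 hlt]
  by_cases hc : (PySem.Int.mod k i == 0) = true
  · simp only [hc, if_pos]
    constructor
    · rw [List.modify_eq_set, List.map_set]
      congr 1
      · rw [List.getElem?_eq_getElem (by simpa using hk)]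
        split <;> simp
    · simp
  · simp [hc]

theorem A_inner_fold (i : Int) : ∀ (ks : List Int) (d : List (Int × Int)),
    (∀ k ∈ ks, 2 ≤ k ∧ (k - 1).toNat < d.length) →
    (ks.foldl (pvStepA i) d).map (·.2)
      = ks.foldl (pvBump (fun k => PySem.Int.mod k i == 0)) (d.map (·.2))
    ∧ (ks.foldl (pvStepA i) d).length = d.length := by
  intro ks
  induction ks with
  | nil => intro d _; exact ⟨rfl, rfl⟩
  | cons k ks ih =>
    intro d h
    obtain ⟨h2, hk⟩ := h k (List.mem_cons_self ..)
    obtain ⟨hmap, hlen⟩ := pvStepA_snd i k d h2 hk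
    have h' : ∀ k' ∈ ks, 2 ≤ k' ∧ (k' - 1).toNat < (pvStepA i d k).length := by
      intro k' hk'
      obtain ⟨a, b⟩ := h k' (List.mem_cons_of_mem _ hk')
      exact ⟨a, by rw [hlen]; exact b⟩
    obtain ⟨ih1, ih2⟩ := ih (pvStepA i d k) h'
    refine ⟨?_, ?_⟩
    · rw [List.foldl_cons, List.foldl_cons, ih1, hmap]
    · rw [List.foldl_cons, ih2, hlen]

theorem B_inner_eq_bump (ks : List Int) (xs : List Int) :
    ks.foldl (fun counts m => counts.modify (m - 1).toNat (· + 1)) xs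
      = ks.foldl (pvBump (fun _ => true)) xs := by
  apply PySem.List.foldl_congr_mem
  intro acc x _
  simp [pvBump]

theorem nodup_pyRange_pos (a b s : Int) (hs : 0 < s) : (PySem.List.pyRange a b s).Nodup := by
  rw [PySem.List.pyRange_of_pos a b hs]
  refine List.Nodup.map ?_ (List.nodup_range)
  intro x y h
  have hxy : (s : Int) * x = s * y := by linarith
  have := mul_left_cancel₀ (ne_of_gt hs) hxy
  exact_mod_cast this

theorem countP_multiples (dv L : Int) (j : Nat) (hd : 2 ≤ dv) (hj : (j : Int) < L) :
    ((PySem.List.pyRange dv (L + 1) dv).countP (fun k => (k == (j : Int) + 1)))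
      = if dv ∣ ((j : Int) + 1) then 1 else 0 := by
  have h := countP_sel_eq (PySem.List.pyRange dv (L + 1) dv)
    (nodup_pyRange_pos _ _ _ (by omega)) (fun _ => true) ((j : Int) + 1)
  simp only [Bool.true_and] at h
  rw [h]
  have hmem : ((j : Int) + 1 ∈ PySem.List.pyRange dv (L + 1) dv) ↔ dv ∣ ((j : Int) + 1) := by
    rw [PySem.List.mem_pyRange_iff_of_pos (by omega)]
    constructor
    · rintro ⟨_, _, hdvd⟩
      have : dv ∣ ((j : Int) + 1 - dv) + dv := hdvd.add (dvd_refl dv)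
      simpa using this
    · intro hdvd
      refine ⟨Int.le_of_dvd (by omega) hdvd, by omega, ?_⟩
      exact (Int.dvd_sub hdvd (dvd_refl dv))
  simp [hmem]

theorem countP_A_range (i L : Int) (j : Nat) (hj : (j : Int) < L) :
    ((PySem.List.pyRange 2 (L + 1)).countP
        (fun k => (PySem.Int.mod k i == 0) && (k == (j : Int) + 1)))
      = if 1 ≤ j ∧ PySem.Int.mod ((j : Int) + 1) i = 0 then 1 else 0 := by
  rw [countP_sel_eq _ (PySem.List.nodup_pyRange_one _ _)]
  have hmem : ((j : Int) + 1 ∈ PySem.List.pyRange 2 (L + 1)) ↔ 1 ≤ j := by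
    rw [PySem.List.mem_pyRange_one]
    omega
  simp [hmem]

theorem A_outer (L : Int) (hL : 0 ≤ L) : ∀ (is : List Int), (∀ i ∈ is, 2 ≤ i) →
    ∀ d : List (Int × Int), d.length = L.toNat →
    (is.foldl (fun lockersData i =>
        if i == 1 then
          (PySem.List.pyRange 1 (L + 1)).foldl (fun d _j => d ++ [(1, 1)]) lockersData
        else
          (PySem.List.pyRange 2 (L + 1)).foldl (pvStepA i) lockersData) d).length = L.toNat
    ∧ ∀ j : Nat, j < L.toNat →
      ((is.foldl (fun lockersData i =>
        if i == 1 then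
          (PySem.List.pyRange 1 (L + 1)).foldl (fun d _j => d ++ [(1, 1)]) lockersData
        else
          (PySem.List.pyRange 2 (L + 1)).foldl (pvStepA i) lockersData) d).map (·.2)).getD j 0
        = (d.map (·.2)).getD j 0
          + (if 1 ≤ j then ((is.countP (fun i => PySem.Int.mod ((j : Int) + 1) i == 0)) : Int) else 0) := by
  intro is
  induction is with
  | nil =>
    intro _ d hd
    refine ⟨hd, ?_⟩
    intro j hj
    simp
  | cons i is ih =>
    intro h d hd
    have hi : 2 ≤ i := h i (List.mem_cons_self ..)
    have h' : ∀ i' ∈ is, 2 ≤ i' := fun i' hi' => h i' (List.mem_cons_of_mem _ hi')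
    have hibeq : (i == 1) = false := by simp only [beq_eq_false_iff_ne, ne_eq]; omega
    have hcond : ∀ k ∈ PySem.List.pyRange 2 (L + 1), 2 ≤ k ∧ (k - 1).toNat < d.length := by
      intro k hk
      rw [PySem.List.mem_pyRange_one] at hk
      refine ⟨by omega, by rw [hd]; omega⟩
    obtain ⟨hmap, hlen⟩ := A_inner_fold i (PySem.List.pyRange 2 (L + 1)) d hcond
    obtain ⟨ihlen, ihget⟩ := ih h' _ (by rw [hlen, hd])
    rw [List.foldl_cons]
    simp only [hibeq, Bool.false_eq_true, if_false]
    refine ⟨ihlen, ?_⟩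
    intro j hj
    rw [ihget j hj, hmap]
    have h1 : ∀ k ∈ PySem.List.pyRange 2 (L + 1), (1 : Int) ≤ k := by
      intro k hk; rw [PySem.List.mem_pyRange_one] at hk; omega
    have hjlen : j < (d.map (·.2)).length := by simpa [hd] using hj
    rw [pvBumpFold_getD _ _ h1 _ j hjlen]
    rw [countP_A_range i L j (by omega)]
    rw [List.countP_cons]
    by_cases h1j : 1 ≤ j
    · by_cases hm : PySem.Int.mod ((j : Int) + 1) i = 0
      · simp [h1j, hm]; ring
      · simp [h1j, hm]
    · simp [h1j]

theorem B_outer (L : Int) (hL : 0 ≤ L) : ∀ (ds : List Int), (∀ dv ∈ ds, 2 ≤ dv) →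
    ∀ xs : List Int, xs.length = L.toNat →
    (ds.foldl (fun counts d => (PySem.List.pyRange d (L + 1) d).foldl
        (fun counts m => counts.modify (m - 1).toNat (· + 1)) counts) xs).length = L.toNat
    ∧ ∀ j : Nat, j < L.toNat →
      (ds.foldl (fun counts d => (PySem.List.pyRange d (L + 1) d).foldl
        (fun counts m => counts.modify (m - 1).toNat (· + 1)) counts) xs).getD j 0
        = xs.getD j 0 + ((ds.countP (fun dv => decide (dv ∣ ((j : Int) + 1)))) : Int) := by
  intro ds
  induction ds with
  | nil =>
    intro _ xs hxs
    refine ⟨hxs, ?_⟩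
    intro j hj
    simp
  | cons dv ds ih =>
    intro h xs hxs
    have hdv : 2 ≤ dv := h dv (List.mem_cons_self ..)
    have h' : ∀ d' ∈ ds, 2 ≤ d' := fun d' hd' => h d' (List.mem_cons_of_mem _ hd')
    rw [List.foldl_cons]
    have hinner := B_inner_eq_bump (PySem.List.pyRange dv (L + 1) dv) xs
    have hlen : ((PySem.List.pyRange dv (L + 1) dv).foldl
        (fun counts m => counts.modify (m - 1).toNat (· + 1)) xs).length = L.toNat := by
      rw [hinner, pvBumpFold_length, hxs]
    obtain ⟨ihlen, ihget⟩ := ih h' _ hlen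
    refine ⟨ihlen, ?_⟩
    intro j hj
    rw [ihget j hj, hinner]
    have h1 : ∀ m ∈ PySem.List.pyRange dv (L + 1) dv, (1 : Int) ≤ m := by
      intro m hm
      rw [PySem.List.mem_pyRange_iff_of_pos (by omega)] at hm
      omega
    rw [pvBumpFold_getD _ _ h1 _ j (by rw [hxs]; exact hj)]
    have hcnt : ((PySem.List.pyRange dv (L + 1) dv).countP
          (fun k => (fun _ => true) k && (k == (j : Int) + 1)))
        = (PySem.List.pyRange dv (L + 1) dv).countP (fun k => (k == (j : Int) + 1)) := by
      simp
    rw [hcnt, countP_multiples dv L j hdv (by omega)]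
    rw [List.countP_cons]
    by_cases hm : dv ∣ ((j : Int) + 1)
    · simp [hm]; ring
    · simp [hm]

theorem append_fold_eq : ∀ (l : List Int) (acc : List (Int × Int)),
    l.foldl (fun d _j => d ++ [((1 : Int), (1 : Int))]) acc
      = acc ++ l.map (fun _ => ((1 : Int), (1 : Int))) := by
  intro l
  induction l with
  | nil => intro acc; simp
  | cons x l ih => intro acc; rw [List.foldl_cons, ih, List.map_cons, List.append_assoc]; rfl

theorem initialLogic_spec (L S : Int) (hL : 0 ≤ L) (_hS : 1 ≤ S) :
    (initialLogic L S).length = L.toNat ∧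
    ∀ j : Nat, j < L.toNat →
      ((initialLogic L S).map (·.2)).getD j 0
        = 1 + (if 1 ≤ j then (((PySem.List.pyRange 2 (S + 1)).countP
            (fun i => PySem.Int.mod ((j : Int) + 1) i == 0)) : Int) else 0) := by
  unfold initialLogic
  rw [PySem.List.pyRange_one_cons (show (1 : Int) < S + 1 by omega), List.foldl_cons,
      show (1 : Int) + 1 = 2 by norm_num]
  have hfirst : (if (1 : Int) == 1 then
        (PySem.List.pyRange 1 (L + 1)).foldl (fun d _j => d ++ [((1 : Int), (1 : Int))]) []
      else (PySem.List.pyRange 2 (L + 1)).foldl (pvStepA 1) [])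
      = (PySem.List.pyRange 1 (L + 1)).map (fun _ => ((1 : Int), (1 : Int))) := by
    rw [if_pos (by simp)]
    rw [append_fold_eq]
    simp
  have hd1len : ((PySem.List.pyRange 1 (L + 1)).map (fun _ => ((1 : Int), (1 : Int)))).length
      = L.toNat := by
    simp [PySem.List.length_pyRange_one]
  have hmem : ∀ i ∈ PySem.List.pyRange 2 (S + 1), (2 : Int) ≤ i := by
    intro i hi; rw [PySem.List.mem_pyRange_one] at hi; omega
  obtain ⟨hlen, hget⟩ := A_outer L hL (PySem.List.pyRange 2 (S + 1)) hmem _ hd1len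
  rw [hfirst]
  refine ⟨hlen, ?_⟩
  intro j hj
  rw [hget j hj]
  have hbase : (((PySem.List.pyRange 1 (L + 1)).map
      (fun _ => ((1 : Int), (1 : Int)))).map (·.2)).getD j 0 = 1 := by
    rw [List.getD_eq_getElem _ _ (by simpa [PySem.List.length_pyRange_one] using hj)]
    simp
  rw [hbase]

theorem pvSieve_spec (L S : Int) (hL : 0 ≤ L) :
    (pvSieve L S).length = L.toNat ∧
    ∀ j : Nat, j < L.toNat →
      (pvSieve L S).getD j 0
        = 1 + (((PySem.List.pyRange 2 (min S L + 1)).countP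
            (fun dv => decide (dv ∣ ((j : Int) + 1)))) : Int) := by
  unfold pvSieve
  have hmem : ∀ dv ∈ PySem.List.pyRange 2 (min S L + 1), (2 : Int) ≤ dv := by
    intro dv hdv; rw [PySem.List.mem_pyRange_one] at hdv; omega
  obtain ⟨hlen, hget⟩ := B_outer L hL (PySem.List.pyRange 2 (min S L + 1)) hmem
    (List.replicate L.toNat 1) (by simp)
  refine ⟨hlen, ?_⟩
  intro j hj
  rw [hget j hj]
  rw [List.getD_eq_getElem _ _ (by simpa using hj)]
  simp

theorem count_bridge (L S : Int) (hL : 1 ≤ L) (_hS : 1 ≤ S) (j : Nat) (hj : j < L.toNat) :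
    (if 1 ≤ j then (((PySem.List.pyRange 2 (S + 1)).countP
        (fun i => PySem.Int.mod ((j : Int) + 1) i == 0)) : Int) else 0)
      = (((PySem.List.pyRange 2 (min S L + 1)).countP
        (fun dv => decide (dv ∣ ((j : Int) + 1)))) : Int) := by
  have hpred : (PySem.List.pyRange 2 (S + 1)).countP
      (fun i => PySem.Int.mod ((j : Int) + 1) i == 0)
      = (PySem.List.pyRange 2 (S + 1)).countP (fun i => decide (i ∣ ((j : Int) + 1))) := by
    apply List.countP_congr
    intro i _
    simp [PySem.Int.mod_eq_zero_iff_dvd]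
  by_cases h1j : 1 ≤ j
  · rw [if_pos h1j, hpred]
    rcases le_or_gt S L with hSL | hLS
    · rw [min_eq_left hSL]
    · rw [min_eq_right (le_of_lt hLS)]
      rw [PySem.List.pyRange_one_append 2 (L + 1) (S + 1) (by omega) (by omega)]
      rw [List.countP_append]
      have htail : (PySem.List.pyRange (L + 1) (S + 1)).countP
          (fun i => decide (i ∣ ((j : Int) + 1))) = 0 := by
        apply List.countP_eq_zero.mpr
        intro i hi
        rw [PySem.List.mem_pyRange_one] at hi
        simp only [decide_eq_true_eq]
        intro hdvd
        have := Int.le_of_dvd (by omega) hdvd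
        omega
      rw [htail]
      simp
  · rw [if_neg h1j]
    have hj0 : j = 0 := by omega
    subst hj0
    have hz : (PySem.List.pyRange 2 (min S L + 1)).countP
        (fun dv => decide (dv ∣ ((0 : Nat) + 1 : Int))) = 0 := by
      apply List.countP_eq_zero.mpr
      intro dv hdv
      rw [PySem.List.mem_pyRange_one] at hdv
      simp only [decide_eq_true_eq]
      intro hdvd
      have := Int.le_of_dvd (by omega) hdvd
      omega
    simp only [Nat.cast_zero] at hz ⊢
    rw [hz]
    simp

theorem argmax_eq (data : List (Int × Int)) (s0 : Int × Int) :
    (PySem.List.pyRange 0 (data.length : Int)).foldl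
      (fun (st : Int × Int) i =>
        match PySem.List.pyGet? data i with
        | none => st
        | some locker => if locker.2 ≥ st.2 then (i, locker.2) else st) s0
    = (PySem.List.enumerate (data.map (·.2))).foldl
      (fun (st : Int × Int) p => if p.2 ≥ st.2 then (p.1, p.2) else st) s0 := by
  rw [PySem.List.enumerate_eq_map_pyRange _ 0]
  rw [List.foldl_map]
  simp only [PySem.List.len_eq, List.length_map]
  apply PySem.List.foldl_congr_mem
  intro acc i hi
  rw [PySem.List.mem_pyRange_one] at hi
  have hlt : i < (data.length : Int) := hi.2
  rw [PySem.List.pyGet?_eq_some_getElem data hi.1 hlt]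
  rw [PySem.List.pyGetD_of_nonneg _ _ hi.1]
  have hnat : i.toNat < (data.map (·.2)).length := by simp; omega
  rw [List.getD_eq_getElem _ _ hnat]
  simp

-- ===== VERDICT (by name: the statement is the Claim_ definition above) =====
theorem mostTouchableLocker_spec : Claim_equal_mostTouchableLocker := by
  unfold Claim_equal_mostTouchableLocker Spec_mostTouchableLocker
  intro L S _
  unfold mostTouchableLocker mostTouchableLocker_alt
  by_cases hS : S < 0
  · simp [hS]
  by_cases hL : L < 0
  · simp [hL]
  simp only [hS, hL, decide_false, Bool.or_self, Bool.false_eq_true, if_false]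
  by_cases hS0 : S = 0
  · subst hS0
    have hdata : initialLogic L 0 = [] := by
      unfold initialLogic
      rw [show PySem.List.pyRange 1 (0 + 1) = [] from PySem.List.pyRange_one_eq_nil (by omega)]
      rfl
    rw [hdata]
    simp
  by_cases hL0 : L = 0
  · subst hL0
    obtain ⟨hAlen, _⟩ := initialLogic_spec 0 S (by omega) (by omega)
    have hdata : initialLogic 0 S = [] := List.eq_nil_of_length_eq_zero (by simpa using hAlen)
    rw [hdata]
    simp
  -- main case: 1 ≤ L and 1 ≤ S
  obtain ⟨hAlen, hAget⟩ := initialLogic_spec L S (by omega) (by omega)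
  obtain ⟨hBlen, hBget⟩ := pvSieve_spec L S (by omega)
  have hEq : (initialLogic L S).map (·.2) = pvSieve L S := by
    apply List.ext_getElem (by simp [hAlen, hBlen])
    intro j h1 h2
    have hjL : j < L.toNat := by
      have := h1
      simp only [List.length_map, hAlen] at this
      exact this
    rw [← List.getD_eq_getElem _ 0 h1, ← List.getD_eq_getElem _ 0 h2]
    rw [hAget j hjL, hBget j hjL, count_bridge L S (by omega) (by omega) j hjL]
  have hz : (L == 0 || S == 0) = false := by
    simp only [Bool.or_eq_false_iff, beq_eq_false_iff_ne, ne_eq]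
    omega
  simp only [hz, Bool.false_eq_true, if_false]
  rw [argmax_eq (initialLogic L S) (-1, 0), hEq]
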